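-- pv_equiv track=rewrite | github.com/ADITYATALEKAR/guardian-platform | infrastructure/posture/finding_engine.py | _split_signals
-- ===== SOURCE A (Python) =====
-- from typing import Any, Dict, Iterable, List, Optional, Tuple
--
-- def _split_signals(
--
--     posture_signals: Iterable[Dict[str, Any]],
-- ) -> Tuple[Optional[Dict[str, Any]], Optional[Dict[str, Any]]]:
--     waf_signal: Optional[Dict[str, Any]] = None
--     tls_signal: Optional[Dict[str, Any]] = None
--     for signal in posture_signals or []:
--         if not isinstance(signal, dict):
--             continue
--         if "waf_vendor" in signal and "classification_confidence" in signal: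
--             waf_signal = signal
--         if "negotiated_tls_version" in signal and "quantum_ready" in signal:
--             tls_signal = signal
--     return waf_signal, tls_signal
-- ===== SOURCE B (Python) =====
-- from typing import Any, Dict, Iterable, List, Optional, Tuple
--
-- def _is_waf(entry):
--     return isinstance(entry, dict) and "waf_vendor" in entry and "classification_confidence" in entry
--
-- def _is_tls(entry):
--     return isinstance(entry, dict) and "negotiated_tls_version" in entry and "quantum_ready" in entry
--
-- def _split_signals(
--     posture_signals: Iterable[Dict[str, Any]],
-- ) -> Tuple[Optional[Dict[str, Any]], Optional[Dict[str, Any]]]: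
--     items = list(posture_signals or [])
--     waf: Optional[Dict[str, Any]] = None
--     tls: Optional[Dict[str, Any]] = None
--     for entry in reversed(items):
--         if waf is None and _is_waf(entry):
--             waf = entry
--         if tls is None and _is_tls(entry):
--             tls = entry
--         if waf is not None and tls is not None:
--             break
--     return waf, tls
-- ===== Notes on version B (the rewrite author's own statement) =====
-- stated objective: alternative
-- what changed: B scans the materialized list in reverse, keeps the FIRST reverse match for each predicate and breaks as soon as both are found, instead of A's forward pass that overwrites both slots on every hit.
import Mathlib
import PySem

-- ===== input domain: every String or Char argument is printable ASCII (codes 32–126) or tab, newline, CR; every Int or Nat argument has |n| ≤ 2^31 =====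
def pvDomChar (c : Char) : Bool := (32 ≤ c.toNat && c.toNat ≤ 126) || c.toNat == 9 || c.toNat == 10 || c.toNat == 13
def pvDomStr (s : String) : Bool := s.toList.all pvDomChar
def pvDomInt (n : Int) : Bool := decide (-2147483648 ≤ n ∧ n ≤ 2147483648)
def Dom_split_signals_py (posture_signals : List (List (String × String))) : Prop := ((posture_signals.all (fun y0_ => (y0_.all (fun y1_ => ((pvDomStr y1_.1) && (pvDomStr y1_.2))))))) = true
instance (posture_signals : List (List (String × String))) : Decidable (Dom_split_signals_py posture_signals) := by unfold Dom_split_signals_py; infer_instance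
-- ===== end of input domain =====

-- B: reverse scan taking the first match per predicate with early exit, instead of A's
-- forward overwrite-on-every-hit pass; same return value, different decomposition.

-- "k in signal" on a dict: key membership in the association list
def pvHasKey (signal : List (String × String)) (k : String) : Bool :=
  signal.any (fun p => p.1 == k)

def pvIsWaf (signal : List (String × String)) : Bool :=
  pvHasKey signal "waf_vendor" && pvHasKey signal "classification_confidence"

def pvIsTls (signal : List (String × String)) : Bool :=
  pvHasKey signal "negotiated_tls_version" && pvHasKey signal "quantum_ready"

-- ===== PORT A =====
-- forward loop; each matching signal overwrites the corresponding slot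
def split_signals_py (posture_signals : List (List (String × String))) : (Option (List (String × String))) × (Option (List (String × String))) :=
  posture_signals.foldl
    (fun (st : Option (List (String × String)) × Option (List (String × String))) signal =>
      (if pvIsWaf signal then some signal else st.1,
       if pvIsTls signal then some signal else st.2))
    (none, none)

-- ===== PORT B =====
-- reverse loop with early break once both slots are filled
def pvRevScan : List (List (String × String)) → Option (List (String × String)) → Option (List (String × String)) → (Option (List (String × String))) × (Option (List (String × String)))
  | [], w, t => (w, t)
  | signal :: rest, w, t =>
    let w' := if w.isNone && pvIsWaf signal then some signal else w
    let t' := if t.isNone && pvIsTls signal then some signal else t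
    if w'.isSome && t'.isSome then (w', t') else pvRevScan rest w' t'

def split_signals_py_alt (posture_signals : List (List (String × String))) : (Option (List (String × String))) × (Option (List (String × String))) :=
  pvRevScan posture_signals.reverse none none

-- ===== PRECONDITION & SPEC =====
def Spec_split_signals_py (posture_signals : List (List (String × String))) (out : (Option (List (String × String))) × (Option (List (String × String)))) : Prop := out = split_signals_py_alt posture_signals
instance (posture_signals : List (List (String × String))) (out : (Option (List (String × String))) × (Option (List (String × String)))) : Decidable (Spec_split_signals_py posture_signals out) := by unfold Spec_split_signals_py; infer_instance

-- ===== CLAIM (what is proved, stated in full; the proofs are below) =====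
def Claim_equal_split_signals_py : Prop := ∀ (posture_signals : List (List (String × String))), Dom_split_signals_py posture_signals → Spec_split_signals_py posture_signals (split_signals_py posture_signals)

-- ===== LEMMAS AND PROOFS =====

-- ===== VERDICT (by name: the statement is the Claim_ definition above) =====
theorem pvRevScan_eq (l : List (List (String × String))) (w t : Option (List (String × String))) :
    pvRevScan l w t = (w.or (l.find? pvIsWaf), t.or (l.find? pvIsTls)) := by
  induction l generalizing w t with
  | nil => simp [pvRevScan]
  | cons x xs ih =>
    simp only [pvRevScan, List.find?]
    cases w <;> cases t <;>
      by_cases hw : pvIsWaf x <;> by_cases ht : pvIsTls x <;>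
        simp [hw, ht, ih, Option.or]

theorem pvFoldl_eq (l : List (List (String × String))) (w t : Option (List (String × String))) :
    l.foldl
      (fun (st : Option (List (String × String)) × Option (List (String × String))) signal =>
        (if pvIsWaf signal then some signal else st.1,
         if pvIsTls signal then some signal else st.2)) (w, t)
    = ((l.reverse.find? pvIsWaf).or w, (l.reverse.find? pvIsTls).or t) := by
  induction l generalizing w t with
  | nil => simp
  | cons x xs ih =>
    simp only [List.foldl_cons, ih, List.reverse_cons, List.find?_append]
    by_cases hw : pvIsWaf x <;> by_cases ht : pvIsTls x <;>
      cases hxs : xs.reverse.find? pvIsWaf <;> cases hxs2 : xs.reverse.find? pvIsTls <;>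
        simp [hw, ht, Option.or, List.find?]

theorem split_signals_py_spec : Claim_equal_split_signals_py := by
  intro xs _
  unfold Spec_split_signals_py split_signals_py split_signals_py_alt
  rw [pvFoldl_eq, pvRevScan_eq]
  cases xs.reverse.find? pvIsWaf <;> cases xs.reverse.find? pvIsTls <;> simp [Option.or]
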